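-- pv_equiv track=rewrite | github.com/Bonjiovanni/arik-litigation | fw_walk_grp1.py | classify_file_family
-- ===== SOURCE A (Python) =====
-- _FAMILY_MAP: dict[str, set[str]] = {
--     "pdf":          {".pdf"},
--     "word_doc":     {".doc", ".docx", ".odt", ".rtf", ".dot", ".dotx"},
--     "spreadsheet":  {".xls", ".xlsx", ".xlsm", ".xlsb", ".csv", ".ods", ".numbers"},
--     "text_file":    {".txt", ".md", ".log", ".json", ".xml", ".html", ".htm",
--                      ".yaml", ".yml", ".ini", ".toml", ".cfg"},
--     "presentation": {".ppt", ".pptx", ".odp", ".key"},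
--     "image":        {".jpg", ".jpeg", ".png", ".gif", ".bmp", ".tiff", ".tif",
--                      ".heic", ".heif", ".webp", ".svg", ".raw", ".cr2", ".nef",
--                      ".arw", ".dng", ".ico"},
--     "email_file":   {".eml", ".msg", ".pst", ".ost", ".mbox"},
--     "archive":      {".zip", ".rar", ".7z", ".tar", ".gz", ".bz2", ".xz", ".cab"},
--     "audio":        {".mp3", ".wav", ".m4a", ".flac", ".aac", ".ogg", ".wma", ".aiff"},
--     "video":        {".mp4", ".mov", ".avi", ".mkv", ".wmv", ".flv", ".m4v",
--                      ".mpg", ".mpeg", ".webm"},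
-- }
--
-- def classify_file_family(
--     filename: str,
--     extension: str,
--     family_map: "dict[str, set[str]] | None" = None,
-- ) -> str:
--     """Classify a file into a logical family based on its extension.
--
--     Args:
--         filename:   The file's basename (not currently inspected; reserved
--                     for future magic-byte fallback).
--         extension:  Lowercased extension including the leading dot, e.g. ".pdf".
--                     Caller is responsible for lowercasing before passing in.
--         family_map: Optional extension map loaded via load_file_family_config().
--                     Falls back to the built-in _FAMILY_MAP if None.
--
--     Returns:
--         One of the family names in the map, or "other" if not matched.
--     """
--     effective_map = family_map if family_map is not None else _FAMILY_MAP
--     ext = extension.lower()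
--     for family, extensions in effective_map.items():
--         if ext in extensions:
--             return family
--     return "other"
-- ===== SOURCE B (Python) =====
-- _EXT_TO_FAMILY: dict[str, str] = {
--     ".pdf": "pdf",
--     ".doc": "word_doc",
--     ".docx": "word_doc",
--     ".odt": "word_doc",
--     ".rtf": "word_doc",
--     ".dot": "word_doc",
--     ".dotx": "word_doc",
--     ".xls": "spreadsheet",
--     ".xlsx": "spreadsheet",
--     ".xlsm": "spreadsheet",
--     ".xlsb": "spreadsheet",
--     ".csv": "spreadsheet",
--     ".ods": "spreadsheet",
--     ".numbers": "spreadsheet",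
--     ".txt": "text_file",
--     ".md": "text_file",
--     ".log": "text_file",
--     ".json": "text_file",
--     ".xml": "text_file",
--     ".html": "text_file",
--     ".htm": "text_file",
--     ".yaml": "text_file",
--     ".yml": "text_file",
--     ".ini": "text_file",
--     ".toml": "text_file",
--     ".cfg": "text_file",
--     ".ppt": "presentation",
--     ".pptx": "presentation",
--     ".odp": "presentation",
--     ".key": "presentation",
--     ".jpg": "image",
--     ".jpeg": "image",
--     ".png": "image",
--     ".gif": "image",
--     ".bmp": "image",
--     ".tiff": "image",
--     ".tif": "image",
--     ".heic": "image",
--     ".heif": "image",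
--     ".webp": "image",
--     ".svg": "image",
--     ".raw": "image",
--     ".cr2": "image",
--     ".nef": "image",
--     ".arw": "image",
--     ".dng": "image",
--     ".ico": "image",
--     ".eml": "email_file",
--     ".msg": "email_file",
--     ".pst": "email_file",
--     ".ost": "email_file",
--     ".mbox": "email_file",
--     ".zip": "archive",
--     ".rar": "archive",
--     ".7z": "archive",
--     ".tar": "archive",
--     ".gz": "archive",
--     ".bz2": "archive",
--     ".xz": "archive",
--     ".cab": "archive",
--     ".mp3": "audio",
--     ".wav": "audio",
--     ".m4a": "audio",
--     ".flac": "audio",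
--     ".aac": "audio",
--     ".ogg": "audio",
--     ".wma": "audio",
--     ".aiff": "audio",
--     ".mp4": "video",
--     ".mov": "video",
--     ".avi": "video",
--     ".mkv": "video",
--     ".wmv": "video",
--     ".flv": "video",
--     ".m4v": "video",
--     ".mpg": "video",
--     ".mpeg": "video",
--     ".webm": "video",
-- }
--
-- def classify_file_family(
--     filename: str,
--     extension: str,
--     family_map: "dict[str, set[str]] | None" = None,
-- ) -> str:
--     """Classify via a flat extension->family table.
--
--     The built-in map is pre-inverted at module load into _EXT_TO_FAMILY so the
--     common (family_map=None) call is a single dict lookup.  A caller-supplied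
--     map is inverted on the fly; setdefault keeps first-listed-family-wins,
--     matching the original first-match scan.
--     """
--     ext = extension.lower()
--     if family_map is None:
--         return _EXT_TO_FAMILY.get(ext, "other")
--     inv: dict[str, str] = {}
--     for family, extensions in family_map.items():
--         for e in extensions:
--             inv.setdefault(e, family)
--     return inv.get(ext, "other")
-- ===== Notes on version B (the rewrite author's own statement) =====
-- stated objective: alternative
-- what changed: B replaces A's per-call scan over families with a flat extension->family table: the built-in map is pre-inverted into a literal ext->family dict answered by one lookup, and a caller-supplied map is inverted once with setdefault (first-listed family wins) before a single lookup.
import Mathlib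
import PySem

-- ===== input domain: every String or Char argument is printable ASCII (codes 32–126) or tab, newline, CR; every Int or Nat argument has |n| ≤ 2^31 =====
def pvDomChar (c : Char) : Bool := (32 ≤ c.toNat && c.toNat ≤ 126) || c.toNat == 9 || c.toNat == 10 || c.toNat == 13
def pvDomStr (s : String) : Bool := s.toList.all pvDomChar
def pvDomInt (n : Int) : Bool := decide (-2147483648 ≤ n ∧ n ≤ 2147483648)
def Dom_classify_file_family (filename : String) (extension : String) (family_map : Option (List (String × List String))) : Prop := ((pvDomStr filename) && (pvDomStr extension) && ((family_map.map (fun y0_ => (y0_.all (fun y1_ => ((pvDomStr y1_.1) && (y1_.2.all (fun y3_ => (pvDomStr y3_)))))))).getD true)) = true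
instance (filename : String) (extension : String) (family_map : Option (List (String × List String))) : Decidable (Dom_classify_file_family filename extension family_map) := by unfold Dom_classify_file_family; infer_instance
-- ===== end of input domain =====

-- B replaces A's per-family membership scan with a flat extension→family table (pre-inverted literal for the default map, setdefault-built index for a custom map); same semantics, alternative structure.

-- ===== PORT A =====
def pvFamilyMap : List (String × List String) :=
  [("pdf", [".pdf"]),
   ("word_doc", [".doc", ".docx", ".odt", ".rtf", ".dot", ".dotx"]),
   ("spreadsheet", [".xls", ".xlsx", ".xlsm", ".xlsb", ".csv", ".ods", ".numbers"]),
   ("text_file", [".txt", ".md", ".log", ".json", ".xml", ".html", ".htm",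
                  ".yaml", ".yml", ".ini", ".toml", ".cfg"]),
   ("presentation", [".ppt", ".pptx", ".odp", ".key"]),
   ("image", [".jpg", ".jpeg", ".png", ".gif", ".bmp", ".tiff", ".tif",
              ".heic", ".heif", ".webp", ".svg", ".raw", ".cr2", ".nef",
              ".arw", ".dng", ".ico"]),
   ("email_file", [".eml", ".msg", ".pst", ".ost", ".mbox"]),
   ("archive", [".zip", ".rar", ".7z", ".tar", ".gz", ".bz2", ".xz", ".cab"]),
   ("audio", [".mp3", ".wav", ".m4a", ".flac", ".aac", ".ogg", ".wma", ".aiff"]),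
   ("video", [".mp4", ".mov", ".avi", ".mkv", ".wmv", ".flv", ".m4v",
              ".mpg", ".mpeg", ".webm"])]

-- A's loop: first family whose extension set contains ext, else "other"
def pvLoopA (ext : String) : List (String × List String) → String
  | [] => "other"
  | (family, extensions) :: rest =>
      if extensions.contains ext then family else pvLoopA ext rest

def classify_file_family (filename : String) (extension : String) (family_map : Option (List (String × List String))) : String :=
  let effective_map := family_map.getD pvFamilyMap
  let ext := PySem.Str.lower extension
  pvLoopA ext effective_map

-- ===== PORT B =====
-- _EXT_TO_FAMILY: the built-in map pre-inverted into a flat literal dict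
def pvExtTable : List (String × String) :=
  [(".pdf", "pdf"),
   (".doc", "word_doc"),
   (".docx", "word_doc"),
   (".odt", "word_doc"),
   (".rtf", "word_doc"),
   (".dot", "word_doc"),
   (".dotx", "word_doc"),
   (".xls", "spreadsheet"),
   (".xlsx", "spreadsheet"),
   (".xlsm", "spreadsheet"),
   (".xlsb", "spreadsheet"),
   (".csv", "spreadsheet"),
   (".ods", "spreadsheet"),
   (".numbers", "spreadsheet"),
   (".txt", "text_file"),
   (".md", "text_file"),
   (".log", "text_file"),
   (".json", "text_file"),
   (".xml", "text_file"),
   (".html", "text_file"),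
   (".htm", "text_file"),
   (".yaml", "text_file"),
   (".yml", "text_file"),
   (".ini", "text_file"),
   (".toml", "text_file"),
   (".cfg", "text_file"),
   (".ppt", "presentation"),
   (".pptx", "presentation"),
   (".odp", "presentation"),
   (".key", "presentation"),
   (".jpg", "image"),
   (".jpeg", "image"),
   (".png", "image"),
   (".gif", "image"),
   (".bmp", "image"),
   (".tiff", "image"),
   (".tif", "image"),
   (".heic", "image"),
   (".heif", "image"),
   (".webp", "image"),
   (".svg", "image"),
   (".raw", "image"),
   (".cr2", "image"),
   (".nef", "image"),
   (".arw", "image"),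
   (".dng", "image"),
   (".ico", "image"),
   (".eml", "email_file"),
   (".msg", "email_file"),
   (".pst", "email_file"),
   (".ost", "email_file"),
   (".mbox", "email_file"),
   (".zip", "archive"),
   (".rar", "archive"),
   (".7z", "archive"),
   (".tar", "archive"),
   (".gz", "archive"),
   (".bz2", "archive"),
   (".xz", "archive"),
   (".cab", "archive"),
   (".mp3", "audio"),
   (".wav", "audio"),
   (".m4a", "audio"),
   (".flac", "audio"),
   (".aac", "audio"),
   (".ogg", "audio"),
   (".wma", "audio"),
   (".aiff", "audio"),
   (".mp4", "video"),
   (".mov", "video"),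
   (".avi", "video"),
   (".mkv", "video"),
   (".wmv", "video"),
   (".flv", "video"),
   (".m4v", "video"),
   (".mpg", "video"),
   (".mpeg", "video"),
   (".webm", "video")]
-- custom map: inverted on the fly; setdefault keeps first-listed-family-wins
def pvInvert (m : List (String × List String)) : PySem.Dict String String :=
  m.foldl (fun inv p => p.2.foldl (fun inv e => inv.setdefault e p.1) inv) PySem.Dict.empty

def classify_file_family_alt (filename : String) (extension : String) (family_map : Option (List (String × List String))) : String :=
  let ext := PySem.Str.lower extension
  match family_map with
  | none => (PySem.Dict.mk pvExtTable).getD ext "other"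
  | some m => (pvInvert m).getD ext "other"

-- ===== PRECONDITION & SPEC =====
def Spec_classify_file_family (filename : String) (extension : String) (family_map : Option (List (String × List String))) (out : String) : Prop := out = classify_file_family_alt filename extension family_map
instance (filename : String) (extension : String) (family_map : Option (List (String × List String))) (out : String) : Decidable (Spec_classify_file_family filename extension family_map out) := by unfold Spec_classify_file_family; infer_instance

-- ===== CLAIM (what is proved, stated in full; the proofs are below) =====
def Claim_equal_classify_file_family : Prop := ∀ (filename : String) (extension : String) (family_map : Option (List (String × List String))), Dom_classify_file_family filename extension family_map → Spec_classify_file_family filename extension family_map (classify_file_family filename extension family_map)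

-- ===== LEMMAS AND PROOFS =====

-- setdefault only fills an absent key
theorem pv_get?_setdefault (d : PySem.Dict String String) (k v : String) (x : String) :
    (d.setdefault k v).get? x = ((d.get? x).orElse (fun _ => if x = k then some v else none)) := by
  by_cases hxk : x = k
  · subst hxk
    rw [PySem.Dict.get?_setdefault_self]
    cases h : d.get? x <;> simp [Option.orElse]
  · rw [PySem.Dict.get?_setdefault_of_ne (hne := hxk)]
    cases h : d.get? x <;> simp [Option.orElse, hxk]

-- the inner loop over one family's extensions
theorem pv_inner (exts : List String) (fam : String) (d : PySem.Dict String String) (x : String) :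
    (exts.foldl (fun inv e => inv.setdefault e fam) d).get? x
      = ((d.get? x).orElse (fun _ => if exts.contains x then some fam else none)) := by
  induction exts generalizing d with
  | nil => cases h : d.get? x <;> simp [Option.orElse, h]
  | cons e rest ih =>
    simp only [List.foldl_cons]
    rw [ih, pv_get?_setdefault]
    cases h : d.get? x with
    | some w => simp [Option.orElse]
    | none =>
      simp only [Option.orElse, List.contains_cons]
      by_cases hx : x = e
      · subst hx; simp
      · by_cases hm : rest.contains x = true <;> simp [hx]

-- first match over the family list, as an Option
def pvFind (ext : String) : List (String × List String) → Option String
  | [] => none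
  | (family, extensions) :: rest =>
      if extensions.contains ext then some family else pvFind ext rest

theorem pv_invert_aux (m : List (String × List String)) (d : PySem.Dict String String) (x : String) :
    (m.foldl (fun inv p => p.2.foldl (fun inv e => inv.setdefault e p.1) inv) d).get? x
      = ((d.get? x).orElse (fun _ => pvFind x m)) := by
  induction m generalizing d with
  | nil => cases h : d.get? x <;> simp [pvFind, Option.orElse, h]
  | cons p rest ih =>
    simp only [List.foldl_cons]
    rw [ih, pv_inner]
    cases h : d.get? x with
    | some w => simp [Option.orElse]
    | none =>
      simp only [Option.orElse, pvFind]
      by_cases hc : x ∈ p.2 <;> simp [hc]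

theorem pv_loopA_eq_find (ext : String) (m : List (String × List String)) :
    pvLoopA ext m = (pvFind ext m).getD "other" := by
  induction m with
  | nil => rfl
  | cons p rest ih =>
    cases p with
    | mk family extensions =>
      simp only [pvLoopA, pvFind]
      by_cases hc : ext ∈ extensions <;> simp [hc, ih]

-- a literal dict looks up by first matching key
theorem pv_get?_mk (items : List (String × String)) (x : String) :
    (PySem.Dict.mk items).get? x = (items.find? (fun p => p.1 == x)).map (fun p => p.2) := by
  induction items with
  | nil => rfl
  | cons p rest ih =>
    cases p with
    | mk k v =>
      rw [PySem.Dict.get?_mk_cons]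
      by_cases hk : k = x
      · subst hk; simp
      · have hb : (k == x) = false := by simp [hk]
        simp [hb, ih]

-- pvFind over a family list = lookup in its flattened (extension, family) pairs
theorem pv_find_eq_flat (ext : String) (m : List (String × List String)) :
    pvFind ext m
      = ((m.flatMap (fun p => p.2.map (fun e => (e, p.1)))).find? (fun q => q.1 == ext)).map (fun q => q.2) := by
  induction m with
  | nil => rfl
  | cons p rest ih =>
    cases p with
    | mk family extensions =>
      simp only [pvFind, List.flatMap_cons, List.find?_append]
      have hmap : (extensions.map (fun e => (e, family))).find? (fun q => q.1 == ext)
          = (extensions.find? (fun e => e == ext)).map (fun e => (e, family)) := by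
        rw [List.find?_map]; rfl
      by_cases hc : ext ∈ extensions
      · have : extensions.find? (fun e => e == ext) |>.isSome := by
          rw [List.find?_isSome]; exact ⟨ext, hc, by simp⟩
        cases hf : extensions.find? (fun e => e == ext) with
        | none => rw [hf] at this; simp at this
        | some e =>
          have he : e = ext := by
            have := List.find?_some hf; simpa using this
          subst he
          simp [hc, hmap, hf]
      · have hf : extensions.find? (fun e => e == ext) = none := by
          rw [List.find?_eq_none]
          intro a ha; simp; rintro rfl; exact hc ha
        simp [hc, hmap, hf, ih]

-- the literal table IS the flattened default map
theorem pv_table_eq : pvExtTable = pvFamilyMap.flatMap (fun p => p.2.map (fun e => (e, p.1))) := by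
  rfl

-- ===== VERDICT (by name: the statement is the Claim_ definition above) =====
theorem classify_file_family_spec : Claim_equal_classify_file_family := by
  intro filename extension family_map _
  unfold Spec_classify_file_family classify_file_family classify_file_family_alt pvInvert
  cases family_map with
  | none =>
    simp only [Option.getD]
    rw [pv_loopA_eq_find, PySem.Dict.getD_eq_get?_getD, pv_get?_mk, pv_table_eq, pv_find_eq_flat]
  | some m =>
    simp only [Option.getD]
    rw [pv_loopA_eq_find, PySem.Dict.getD_eq_get?_getD, pv_invert_aux]
    simp [Option.orElse, PySem.Dict.get?_empty]
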